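-- pv_equiv track=rewrite | github.com/OneKekBer/matura-z-informatyki | practise/wlasciwosci-liczb/3.py | num_to_arr
-- ===== SOURCE A (Python) =====
-- def num_to_arr(num):
--    string = str(num)
--    arr = []
--    for i in range(len(string)):
--       letter = string[i]
--       if(int(letter) not in arr):
--          arr.append(int(letter))
--    arr.sort()
--    return arr
-- ===== SOURCE B (Python) =====
-- def num_to_arr(num):
--     nums = [int(c) for c in str(num)]
--     nums.sort()
--     result = []
--     last = None
--     for x in nums:
--         if x != last:
--             result.append(x)
--             last = x
--     return result
-- ===== Notes on version B (the rewrite author's own statement) =====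
-- stated objective: simpler
-- what changed: A dedups by an O(n) membership test on the growing result list and sorts afterwards; B sorts the digit list first and removes duplicates in one adjacent-comparison pass with a 'last appended' variable.
import Mathlib
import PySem

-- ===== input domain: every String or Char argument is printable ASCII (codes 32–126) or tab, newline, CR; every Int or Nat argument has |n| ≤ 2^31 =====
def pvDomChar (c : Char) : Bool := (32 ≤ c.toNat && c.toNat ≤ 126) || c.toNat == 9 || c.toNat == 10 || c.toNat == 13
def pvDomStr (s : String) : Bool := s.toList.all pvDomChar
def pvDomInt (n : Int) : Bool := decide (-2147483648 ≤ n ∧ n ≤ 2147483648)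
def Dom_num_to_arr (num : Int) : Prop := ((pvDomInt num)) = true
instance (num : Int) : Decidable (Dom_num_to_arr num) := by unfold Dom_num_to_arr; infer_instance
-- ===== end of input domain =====

-- B sorts the digits first and drops adjacent duplicates in one pass, instead of
-- A's membership-test dedup followed by a sort (return values proved equal; simpler).

-- int(letter) for a single character, as both Pythons compute it (none = ValueError,
-- excluded by Pre_; the getD 0 default is never reached inside Pre_).
def pvDigit (c : Char) : Int := (PySem.Int.ofStr? (String.mk [c])).getD 0

-- ===== PORT A =====
def num_to_arr (num : Int) : List Int :=
  let string := (PySem.Int.toStr num).toList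
  let arr := string.foldl (fun arr letter =>
    if (pvDigit letter) ∈ arr then arr else arr ++ [pvDigit letter]) []
  PySem.List.sorted arr (fun x => x) false

-- ===== PORT B =====
def num_to_arr_alt (num : Int) : List Int :=
  let nums := ((PySem.Int.toStr num).toList).map pvDigit
  let nums := PySem.List.sorted nums (fun x => x) false
  let st := nums.foldl (fun (st : List Int × Option Int) x =>
    if some x ≠ st.2 then (st.1 ++ [x], some x) else st) ([], none)
  st.1

-- ===== PRECONDITION & SPEC =====
-- Pre_ excludes exactly the negative inputs, where str(num) starts with '-' and
-- int('-') raises ValueError in both A and B.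
def Pre_num_to_arr (num : Int) : Prop := 0 ≤ num
instance (num : Int) : Decidable (Pre_num_to_arr num) := by unfold Pre_num_to_arr; infer_instance
def pvWitness_num_to_arr : Int := (1203)

def Spec_num_to_arr (num : Int) (out : List Int) : Prop := out = num_to_arr_alt num
instance (num : Int) (out : List Int) : Decidable (Spec_num_to_arr num out) := by unfold Spec_num_to_arr; infer_instance

-- ===== CLAIM (what is proved, stated in full; the proofs are below) =====
def Claim_equal_num_to_arr : Prop := ∀ (num : Int), Dom_num_to_arr num → Pre_num_to_arr num → Spec_num_to_arr num (num_to_arr num)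

-- ===== LEMMAS AND PROOFS =====

-- A's accumulator: first-occurrence dedup; membership and nodup invariants.
def pvFoldA (acc : List Int) (s : List Char) : List Int :=
  s.foldl (fun arr letter =>
    if (pvDigit letter) ∈ arr then arr else arr ++ [pvDigit letter]) acc

theorem pvFoldA_mem (s : List Char) (acc : List Int) (a : Int) :
    a ∈ pvFoldA acc s ↔ a ∈ acc ∨ a ∈ s.map pvDigit := by
  induction s generalizing acc with
  | nil => simp [pvFoldA]
  | cons c t ih =>
    simp only [pvFoldA, List.foldl_cons, List.map_cons, List.mem_cons]
    by_cases h : pvDigit c ∈ acc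
    · simp only [if_pos h]
      rw [show (List.foldl _ acc t) = pvFoldA acc t from rfl, ih]
      constructor
      · rintro (ha | ha) <;> tauto
      · rintro (ha | ha | ha) <;> [tauto; (subst ha; tauto); tauto]
    · simp only [if_neg h]
      rw [show (List.foldl _ (acc ++ [pvDigit c]) t) = pvFoldA (acc ++ [pvDigit c]) t from rfl, ih]
      simp only [List.mem_append, List.mem_singleton]
      tauto

theorem pvFoldA_nodup (s : List Char) (acc : List Int) (h : acc.Nodup) :
    (pvFoldA acc s).Nodup := by
  induction s generalizing acc with
  | nil => simpa [pvFoldA]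
  | cons c t ih =>
    simp only [pvFoldA, List.foldl_cons]
    by_cases hm : pvDigit c ∈ acc
    · simp only [if_pos hm]; exact ih acc h
    · simp only [if_neg hm]
      refine ih _ ?_
      rw [List.nodup_append]
      exact ⟨h, List.nodup_singleton _, by intro a ha b hb; rw [List.mem_singleton] at hb; subst hb; exact fun he => hm (he ▸ ha)⟩

-- B's one-pass adjacent dedup, as a structural recursion on the sorted list.
def pvDedup (last : Option Int) : List Int → List Int
  | [] => []
  | x :: xs => if some x ≠ last then x :: pvDedup (some x) xs else pvDedup last xs

theorem pvDedup_cons (last : Option Int) (x : Int) (xs : List Int) :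
    pvDedup last (x :: xs) = if some x ≠ last then x :: pvDedup (some x) xs else pvDedup last xs := rfl

theorem pvFoldB_eq (l : List Int) (res : List Int) (last : Option Int) :
    l.foldl (fun (st : List Int × Option Int) x =>
      if some x ≠ st.2 then (st.1 ++ [x], some x) else st) (res, last)
    = (res ++ pvDedup last l, l.getLast?.or last) := by
  induction l generalizing res last with
  | nil => simp [pvDedup]
  | cons x xs ih =>
    simp only [List.foldl_cons]
    by_cases h : some x = last
    · rw [if_neg (by simp [h]), ih, pvDedup_cons, if_neg (by simp [h]), ← h]
      cases xs <;> simp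
    · rw [if_pos (by simp [h]), ih, pvDedup_cons, if_pos (by simp [h])]
      cases xs <;> simp [List.getLast?_cons, Option.or]

-- On a ≤-sorted list whose elements all dominate `last`, pvDedup is strictly
-- increasing and keeps exactly the members other than `last`.
theorem pvDedup_sorted (l : List Int) (last : Option Int)
    (hs : l.Pairwise (· ≤ ·)) (hl : ∀ v, last = some v → ∀ y ∈ l, v ≤ y) :
    (pvDedup last l).Pairwise (· < ·) ∧ (∀ a, a ∈ pvDedup last l ↔ a ∈ l ∧ last ≠ some a) := by
  induction l generalizing last with
  | nil => simp [pvDedup]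
  | cons x xs ih =>
    have hx : ∀ y ∈ xs, x ≤ y := (List.pairwise_cons.mp hs).1
    have hs' : xs.Pairwise (· ≤ ·) := (List.pairwise_cons.mp hs).2
    by_cases h : some x = last
    · rw [pvDedup_cons, if_neg (by simp [h])]
      obtain ⟨hp, hm⟩ := ih last hs' (by rintro v hv y hy; exact hl v hv y (by simp [hy]))
      refine ⟨hp, fun a => ?_⟩
      rw [hm]
      constructor
      · rintro ⟨ha, hne⟩; exact ⟨by simp [ha], hne⟩
      · rintro ⟨ha, hne⟩
        rcases List.mem_cons.mp ha with rfl | ha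
        · exact absurd h.symm hne
        · exact ⟨ha, hne⟩
    · rw [pvDedup_cons, if_pos (by simp [h])]
      obtain ⟨hp, hm⟩ := ih (some x) hs' (by rintro v hv y hy; cases hv; exact hx y hy)
      constructor
      · refine List.pairwise_cons.mpr ⟨fun y hy => ?_, hp⟩
        obtain ⟨hy1, hy2⟩ := (hm y).mp hy
        exact lt_of_le_of_ne (hx y hy1) (fun he => hy2 (by rw [he]))
      · intro a
        simp only [List.mem_cons, hm]
        constructor
        · rintro (rfl | ⟨ha, hne⟩)
          · exact ⟨Or.inl rfl, fun he => h he.symm⟩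
          · refine ⟨Or.inr ha, fun he => ?_⟩
            cases he
            have h1 : a ≤ x := hl a rfl x (by simp)
            have h2 : x ≤ a := hx a ha
            exact h (congrArg some (le_antisymm h2 h1))
        · rintro ⟨rfl | ha, hne⟩
          · exact Or.inl rfl
          · by_cases hax : a = x
            · exact Or.inl hax
            · exact Or.inr ⟨ha, by simp only [ne_eq, Option.some.injEq]; exact fun he => hax he.symm⟩

-- The core equivalence, over an arbitrary character list.
theorem pvKey (s : List Char) :
    PySem.List.sorted (pvFoldA [] s) (fun x => x) false
      = pvDedup none (PySem.List.sorted (s.map pvDigit) (fun x => x) false) := by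
  have hA_nodup : (pvFoldA [] s).Nodup := pvFoldA_nodup s [] (by simp)
  have hsorted := PySem.List.sorted_pairwise (xs := s.map pvDigit) (key := fun x => x)
  obtain ⟨hBp, hBm⟩ := pvDedup_sorted (PySem.List.sorted (s.map pvDigit) (fun x => x) false) none
    hsorted (by simp)
  have hperm : (pvDedup none (PySem.List.sorted (s.map pvDigit) (fun x => x) false)).Perm
      (pvFoldA [] s) := by
    rw [List.perm_ext_iff_of_nodup hBp.nodup hA_nodup]
    intro a
    rw [hBm a, pvFoldA_mem]
    simp [PySem.List.mem_sorted]
  exact PySem.List.sorted_eq_of_perm_of_pairwise_lt _ _ _ hperm hBp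

-- ===== VERDICT (by name: the statement is the Claim_ definition above) =====
theorem num_to_arr_spec : Claim_equal_num_to_arr := by
  intro num hdom hpre
  unfold Spec_num_to_arr num_to_arr num_to_arr_alt
  simp only [pvFoldB_eq, List.nil_append]
  exact pvKey ((PySem.Int.toStr num).toList)
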